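-- pv_equiv track=rewrite | github.com/YudhaJeo/Desktop-Python-AudioGain | mic_booster_pro.py | find_best_output
-- ===== SOURCE A (Python) =====
-- def find_vbcable(outputs):
--     priorities = [
--         "cable in 16ch",
--         "cable in",
--         "cable",
--         "virtual audio cable",
--         "vb-audio",
--     ]
--     for pat in priorities:
--         for name in outputs:
--             if pat in name.lower():
--                 return name
--     return None
--
-- def find_best_output(outputs, saved_out=""):
--     if saved_out and saved_out in outputs:
--         return saved_out
--     vb = find_vbcable(outputs)
--     if vb:
--         return vb
--     for name in outputs:
--         nl = name.lower()
--         if any(k in nl for k in ["speaker", "headphone", "headset", "realtek", "audio output"]):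
--             return name
--     return outputs[0] if outputs else None
-- ===== SOURCE B (Python) =====
-- def find_best_output(outputs, saved_out=""):
--     if saved_out and saved_out in outputs:
--         return saved_out
--     priorities = [
--         "cable in 16ch",
--         "cable in",
--         "cable",
--         "virtual audio cable",
--         "vb-audio",
--     ]
--
--     def score(name):
--         nl = name.lower()
--         return next((i for i, p in enumerate(priorities) if p in nl), len(priorities))
--
--     if outputs:
--         vb = min(outputs, key=score)
--         if score(vb) < len(priorities):
--             return vb
--     keywords = ["speaker", "headphone", "headset", "realtek", "audio output"]
--     hit = next((n for n in outputs if any(k in n.lower() for k in keywords)), None)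
--     return hit if hit is not None else (outputs[0] if outputs else None)
-- ===== Notes on version B (the rewrite author's own statement) =====
-- stated objective: alternative
-- what changed: find_vbcable's priority-major nested scan is replaced by a single stable argmin: each output gets the index of the first priority pattern it contains (no-match = len(priorities)) and the first output with the strictly smallest score is picked via min(outputs, key=score); the keyword loop becomes a next()-over-generator first match.
import Mathlib
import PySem

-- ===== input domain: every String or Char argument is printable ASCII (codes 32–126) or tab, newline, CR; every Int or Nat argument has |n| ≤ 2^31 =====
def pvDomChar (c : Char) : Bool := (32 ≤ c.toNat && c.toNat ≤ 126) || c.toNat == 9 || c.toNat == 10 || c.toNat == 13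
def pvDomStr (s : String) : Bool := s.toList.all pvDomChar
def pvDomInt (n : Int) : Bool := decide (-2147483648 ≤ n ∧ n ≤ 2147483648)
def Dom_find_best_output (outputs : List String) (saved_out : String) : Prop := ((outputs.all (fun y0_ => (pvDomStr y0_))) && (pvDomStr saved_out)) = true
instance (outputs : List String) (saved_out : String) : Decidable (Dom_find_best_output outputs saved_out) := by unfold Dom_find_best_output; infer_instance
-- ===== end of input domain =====

-- B replaces the priority-major nested scan of find_vbcable by a single stable argmin over a
-- per-name priority score (Python min with key); objective: alternative decomposition, same cost.


-- ===== PORT A =====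
def pvPriorities : List String :=
  ["cable in 16ch", "cable in", "cable", "virtual audio cable", "vb-audio"]

def pvKeywords : List String :=
  ["speaker", "headphone", "headset", "realtek", "audio output"]

-- inner 'for name in outputs' loop of find_vbcable
def pvVbInner (pat : String) (names : List String) : Option String :=
  match names with
  | [] => none
  | n :: rest =>
    if PySem.Str.isIn pat (PySem.Str.lower n) then some n else pvVbInner pat rest

-- outer 'for pat in priorities' loop of find_vbcable
def pvVbOuter (pats : List String) (outputs : List String) : Option String :=
  match pats with
  | [] => none
  | p :: rest =>
    match pvVbInner p outputs with
    | some n => some n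
    | none => pvVbOuter rest outputs

def find_vbcable (outputs : List String) : Option String :=
  pvVbOuter pvPriorities outputs

-- the 'for name in outputs: … any(k in nl …)' loop of find_best_output
def pvKwLoop (names : List String) : Option String :=
  match names with
  | [] => none
  | n :: rest =>
    if pvKeywords.any (fun k => PySem.Str.isIn k (PySem.Str.lower n)) then some n
    else pvKwLoop rest

def find_best_output (outputs : List String) (saved_out : String) : Option String :=
  if saved_out ≠ "" ∧ saved_out ∈ outputs then some saved_out
  else
    match find_vbcable outputs with
    | some vb =>
      -- 'if vb:' — truthiness of the returned name
      if vb ≠ "" then some vb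
      else
        match pvKwLoop outputs with
        | some n => some n
        | none => outputs.head?
    | none =>
      match pvKwLoop outputs with
      | some n => some n
      | none => outputs.head?

-- ===== PORT B =====
-- score(name) = next((i for i, p in enumerate(priorities) if p in nl), len(priorities))
def pvScoreGo (nl : String) (ps : List String) (i : Nat) : Nat :=
  match ps with
  | [] => i
  | p :: rest => if PySem.Str.isIn p nl then i else pvScoreGo nl rest (i + 1)

def pvScore (name : String) : Nat :=
  pvScoreGo (PySem.Str.lower name) pvPriorities 0

def find_best_output_alt (outputs : List String) (saved_out : String) : Option String :=
  if saved_out ≠ "" ∧ saved_out ∈ outputs then some saved_out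
  else
    let kwPart :=
      match outputs.find? (fun n => pvKeywords.any (fun k => PySem.Str.isIn k (PySem.Str.lower n))) with
      | some n => some n
      | none => outputs.head?
    match PySem.List.min? outputs pvScore with
    | some vb => if pvScore vb < pvPriorities.length then some vb else kwPart
    | none => kwPart

-- ===== PRECONDITION & SPEC =====
def Spec_find_best_output (outputs : List String) (saved_out : String) (out : Option String) : Prop := out = find_best_output_alt outputs saved_out
instance (outputs : List String) (saved_out : String) (out : Option String) : Decidable (Spec_find_best_output outputs saved_out out) := by unfold Spec_find_best_output; infer_instance

-- ===== CLAIM (what is proved, stated in full; the proofs are below) =====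
def Claim_equal_find_best_output : Prop := ∀ (outputs : List String) (saved_out : String), Dom_find_best_output outputs saved_out → Spec_find_best_output outputs saved_out (find_best_output outputs saved_out)

-- ===== LEMMAS AND PROOFS =====

-- the step function of PySem.List.min?
def pvMStep (f : String → Nat) : Option String → String → Option String :=
  fun acc x =>
    match acc with
    | none => some x
    | some m => if f x < f m then some x else some m

theorem pvMin?_eq_foldl (f : String → Nat) (t : List String) :
    PySem.List.min? t f = t.foldl (pvMStep f) none := by
  unfold PySem.List.min?
  apply List.foldl_ext
  intro acc x _
  cases acc with
  | none => rfl
  | some m => by_cases h : f x < f m <;> simp [pvMStep, h]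

theorem pvFold_some (f : String → Nat) (t : List String) (m : String) :
    t.foldl (pvMStep f) (some m) =
      match t.foldl (pvMStep f) none with
      | none => some m
      | some m' => if f m' < f m then some m' else some m := by
  induction t generalizing m with
  | nil => simp
  | cons x t ih =>
    simp only [List.foldl_cons]
    rw [show pvMStep f none x = some x from rfl, ih x]
    by_cases hxm : f x < f m
    · rw [show pvMStep f (some m) x = some x from by simp [pvMStep, hxm], ih x]
      cases h : t.foldl (pvMStep f) none with
      | none => simp [hxm]
      | some m' =>
        try dsimp only
        by_cases h1 : f m' < f x
        · simp only [if_pos h1]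
          try dsimp only
          try rw [if_pos (show f m' < f m by omega)]
          try rfl
        · simp only [if_neg h1]
          try dsimp only
          try rw [if_pos hxm]
          try rfl
    · rw [show pvMStep f (some m) x = some m from by simp [pvMStep, hxm], ih m]
      cases h : t.foldl (pvMStep f) none with
      | none => simp [hxm]
      | some m' =>
        try dsimp only
        by_cases h1 : f m' < f x
        · simp only [if_pos h1]
          try dsimp only
          try rfl
        · simp only [if_neg h1]
          try dsimp only
          try rw [if_neg hxm]
          try rw [if_neg (show ¬ f m' < f m by omega)]
          try rfl

theorem pvFold_acc_zero (f : String → Nat) (t : List String) (m : String)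
    (hm : f m = 0) : t.foldl (pvMStep f) (some m) = some m := by
  rw [pvFold_some]
  cases h : t.foldl (pvMStep f) none with
  | none => rfl
  | some m' => simp [hm]

-- the first element with score 0 is the stable argmin
theorem pvMin?_of_find?_zero (f : String → Nat) (q : String → Bool)
    (hq : ∀ n, q n = true ↔ f n = 0) :
    ∀ (names : List String) (y : String),
      names.find? q = some y → names.foldl (pvMStep f) none = some y := by
  intro names
  induction names with
  | nil => intro y h; simp at h
  | cons n t ih =>
    intro y h
    by_cases hn : q n = true
    · simp only [List.find?_cons, hn] at h
      cases h
      simp only [List.foldl_cons]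
      rw [show pvMStep f none n = some n from rfl]
      exact pvFold_acc_zero f t n ((hq n).mp hn)
    · have hn' : q n = false := by simpa using hn
      simp only [List.find?_cons, hn'] at h
      have hy := ih y h
      have hpy := List.find?_some h
      have hfy : f y = 0 := (hq y).mp hpy
      have hfn : 0 < f n := by
        have : ¬ f n = 0 := fun h0 => hn ((hq n).mpr h0)
        omega
      simp only [List.foldl_cons]
      rw [show pvMStep f none n = some n from rfl, pvFold_some, hy]
      dsimp only
      rw [if_pos (by omega : f y < f n)]

-- shifting every score by one does not change the argmin
theorem pvFold_shift (f g : String → Nat) (t : List String)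
    (ht : ∀ x ∈ t, f x = g x + 1) :
    ∀ acc : Option String,
      (∀ m, acc = some m → f m = g m + 1) →
      (t.foldl (pvMStep f) acc = t.foldl (pvMStep g) acc) := by
  induction t with
  | nil => intro acc _; rfl
  | cons x t ih =>
    intro acc hacc
    have hx : f x = g x + 1 := ht x (by simp)
    have ht' : ∀ y ∈ t, f y = g y + 1 := fun y hy => ht y (by simp [hy])
    simp only [List.foldl_cons]
    have hstep : pvMStep f acc x = pvMStep g acc x := by
      cases acc with
      | none => rfl
      | some m =>
        have hm := hacc m rfl
        simp only [pvMStep, hx, hm]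
        split_ifs <;> first | rfl | omega
    rw [hstep]
    apply ih ht'
    intro m hm
    cases acc with
    | none =>
      simp [pvMStep] at hm; subst hm; exact hx
    | some m0 =>
      have hm0 := hacc m0 rfl
      simp only [pvMStep] at hm
      split_ifs at hm <;> (cases hm; assumption)

theorem pvScoreGo_succ (nl : String) (ps : List String) :
    ∀ i, pvScoreGo nl ps (i + 1) = pvScoreGo nl ps i + 1 := by
  induction ps with
  | nil => intro i; rfl
  | cons p rest ih =>
    intro i
    simp only [pvScoreGo]
    split_ifs with h
    · rfl
    · exact ih (i + 1)

-- A's inner loop is find?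
theorem pvVbInner_eq_find? (pat : String) (names : List String) :
    pvVbInner pat names = names.find? (fun n => PySem.Str.isIn pat (PySem.Str.lower n)) := by
  induction names with
  | nil => rfl
  | cons n t ih =>
    simp only [pvVbInner, List.find?_cons]
    by_cases h : PySem.Str.isIn pat (PySem.Str.lower n) = true
    · rw [h]
      simp
    · have h' : PySem.Str.isIn pat (PySem.Str.lower n) = false := by simpa using h
      rw [h']
      simp [ih]

-- A's keyword loop is find?
theorem pvKwLoop_eq_find? (names : List String) :
    pvKwLoop names = names.find? (fun n => pvKeywords.any (fun k => PySem.Str.isIn k (PySem.Str.lower n))) := by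
  induction names with
  | nil => rfl
  | cons n t ih =>
    simp only [pvKwLoop, List.find?_cons]
    by_cases h : (pvKeywords.any fun k => PySem.Str.isIn k (PySem.Str.lower n)) = true
    · rw [h]
      simp
    · have h' : (pvKeywords.any fun k => PySem.Str.isIn k (PySem.Str.lower n)) = false := by
        simpa using h
      rw [h']
      simp [ih]

-- MAIN: the nested priority loop equals the guarded argmin over priority scores
theorem pvOuter_eq_min? :
    ∀ (ps : List String) (names : List String),
      pvVbOuter ps names =
        match PySem.List.min? names (fun n => pvScoreGo (PySem.Str.lower n) ps 0) with
        | some m => if pvScoreGo (PySem.Str.lower m) ps 0 < ps.length then some m else none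
        | none => none := by
  intro ps
  induction ps with
  | nil =>
    intro names
    cases h : PySem.List.min? names (fun n => pvScoreGo (PySem.Str.lower n) [] 0) <;>
      simp [pvVbOuter, pvScoreGo]
  | cons p rest ih =>
    intro names
    set f : String → Nat := fun n => pvScoreGo (PySem.Str.lower n) (p :: rest) 0 with hf
    set g : String → Nat := fun n => pvScoreGo (PySem.Str.lower n) rest 0 with hg
    have hfdef : ∀ n, f n = if PySem.Str.isIn p (PySem.Str.lower n) then 0 else g n + 1 := by
      intro n
      simp only [hf, hg, pvScoreGo]
      split_ifs with h
      · rfl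
      · exact pvScoreGo_succ (PySem.Str.lower n) rest 0
    simp only [pvVbOuter, pvVbInner_eq_find?]
    cases hfind : names.find? (fun n => PySem.Str.isIn p (PySem.Str.lower n)) with
    | some y =>
      have hzero : ∀ n, (PySem.Str.isIn p (PySem.Str.lower n) = true) ↔ f n = 0 := by
        intro n
        rw [hfdef n]
        by_cases h : PySem.Str.isIn p (PySem.Str.lower n) = true
        · rw [if_pos h]; exact ⟨fun _ => rfl, fun _ => h⟩
        · rw [if_neg h]
          exact ⟨fun hh => absurd hh h, fun hh => by omega⟩
      have hminy := pvMin?_of_find?_zero f (fun n => PySem.Str.isIn p (PySem.Str.lower n)) hzero names y hfind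
      rw [pvMin?_eq_foldl, hminy]
      have hpy := List.find?_some hfind
      have hy0 : pvScoreGo (PySem.Str.lower y) (p :: rest) 0 = 0 := (hzero y).mp hpy
      simp [hy0, List.length_cons]
    | none =>
      have hnone : ∀ n ∈ names, ¬ PySem.Str.isIn p (PySem.Str.lower n) = true := by
        intro n hn
        exact List.find?_eq_none.mp hfind n hn
      have hshift : ∀ n ∈ names, f n = g n + 1 := by
        intro n hn
        rw [hfdef n, if_neg (hnone n hn)]
      rw [ih names]
      rw [pvMin?_eq_foldl, pvMin?_eq_foldl]
      rw [pvFold_shift f g names hshift none (by intro m h; cases h)]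
      cases hmin : names.foldl (pvMStep g) none with
      | none => rfl
      | some m =>
        have hm : m ∈ names := by
          have : PySem.List.min? names g = some m := by rw [pvMin?_eq_foldl]; exact hmin
          exact PySem.List.min?_mem this
        have e1 : pvScoreGo (PySem.Str.lower m) (p :: rest) 0
            = pvScoreGo (PySem.Str.lower m) rest 0 + 1 := hshift m hm
        dsimp only
        simp only [List.length_cons]
        split_ifs <;> first | rfl | omega

theorem pvFvb_eq (outputs : List String) :
    find_vbcable outputs =
      match PySem.List.min? outputs pvScore with
      | some m => if pvScore m < pvPriorities.length then some m else none
      | none => none :=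
  pvOuter_eq_min? pvPriorities outputs

theorem pvScore_empty : pvScore "" = 5 := by decide

-- ===== VERDICT (by name: the statement is the Claim_ definition above) =====
theorem find_best_output_spec : Claim_equal_find_best_output := by
  intro outputs saved_out _
  unfold Spec_find_best_output find_best_output find_best_output_alt
  split_ifs with hsaved
  · rfl
  · rw [pvFvb_eq]
    cases hmin : PySem.List.min? outputs pvScore with
    | none => simp [pvKwLoop_eq_find?]
    | some m =>
      by_cases hlt : pvScore m < pvPriorities.length
      · have hne : m ≠ "" := by
          intro h
          rw [h, pvScore_empty] at hlt
          simp [pvPriorities] at hlt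
        simp [hlt, hne]
      · simp [hlt, pvKwLoop_eq_find?]
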